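-- pv_equiv track=rewrite | github.com/Casys-AI/casys-pml | scripts/regen-engine-plots.py | strip_style_lines
-- ===== SOURCE A (Python) =====
-- def strip_style_lines(src: str) -> str:
--     """Remove style-related lines from a code cell, keep everything else."""
--     lines = src.split("\n")
--     kept = []
--     in_rcparams = False
--     for line in lines:
--         stripped = line.strip()
--
--         # Detect start of plt.rcParams.update({
--         if "plt.rcParams.update" in line:
--             in_rcparams = True
--             continue
--
--         # Skip lines inside rcParams dict
--         if in_rcparams:
--             if stripped == "})":
--                 in_rcparams = False
--             continue
--
--         # Skip individual style lines
--         if any(k in line for k in [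
--             "plt.style.use", "set_theme",
--             "ACCENT =", "ACCENT=",
--             "BLUE =", "BLUE=", "RED =", "RED=",
--             "GREY =", "GREY=", "BG =", "BG=",
--             "LIGHT_BLUE =", "GREEN =", "PURPLE =",
--             "CYAN =", "CYAN=",
--         ]):
--             continue
--
--         kept.append(line)
--
--     return "\n".join(kept)
-- ===== SOURCE B (Python) =====
-- _KEYWORDS = [
--     "plt.style.use", "set_theme",
--     "ACCENT =", "ACCENT=",
--     "BLUE =", "BLUE=", "RED =", "RED=",
--     "GREY =", "GREY=", "BG =", "BG=",
--     "LIGHT_BLUE =", "GREEN =", "PURPLE =",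
--     "CYAN =", "CYAN=",
-- ]
--
--
-- def _cut_first_block(lines):
--     """lines with the first rcParams block (marker line through the closing
--     '})' line, or to the end if unterminated) removed; None if no marker."""
--     for i, line in enumerate(lines):
--         if "plt.rcParams.update" in line:
--             rest = lines[i + 1:]
--             for j, l in enumerate(rest):
--                 if l.strip() == "})":
--                     return lines[:i] + rest[j + 1:]
--             return lines[:i]
--     return None
--
--
-- def strip_style_lines(src: str) -> str:
--     """Remove style-related lines from a code cell, keep everything else."""
--     lines = src.split("\n")
--     # Stage 1: repeatedly excise rcParams.update blocks until none remain.
--     while True: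
--         cut = _cut_first_block(lines)
--         if cut is None:
--             break
--         lines = cut
--     # Stage 2: drop the individual style lines.
--     kept = [l for l in lines if not any(k in l for k in _KEYWORDS)]
--     return "\n".join(kept)
-- ===== Notes on version B (the rewrite author's own statement) =====
-- stated objective: alternative
-- what changed: Replaces A's single stateful pass (an in_rcparams flag threaded through one loop that interleaves block skipping and keyword filtering) by two staged passes: stage 1 repeatedly searches for the first plt.rcParams.update line and splices out the whole block up to its closing-brace line (or the end) until none remain, stage 2 filters keyword lines with a comprehension.
import Mathlib
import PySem

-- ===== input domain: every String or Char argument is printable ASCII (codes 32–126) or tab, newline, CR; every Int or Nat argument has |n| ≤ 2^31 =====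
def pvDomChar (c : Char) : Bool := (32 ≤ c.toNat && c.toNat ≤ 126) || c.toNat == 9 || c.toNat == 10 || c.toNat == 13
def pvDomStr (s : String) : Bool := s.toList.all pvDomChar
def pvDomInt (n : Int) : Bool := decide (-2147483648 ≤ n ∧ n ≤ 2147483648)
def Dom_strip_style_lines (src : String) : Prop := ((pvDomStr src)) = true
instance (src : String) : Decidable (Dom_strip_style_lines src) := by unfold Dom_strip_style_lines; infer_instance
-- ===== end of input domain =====

-- B restructures A's single stateful pass into two staged passes: first repeatedly excise
-- whole rcParams.update blocks, then filter keyword lines (objective: alternative).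

-- ===== PORT A =====
def styleKeywords : List String :=
  ["plt.style.use", "set_theme",
   "ACCENT =", "ACCENT=",
   "BLUE =", "BLUE=", "RED =", "RED=",
   "GREY =", "GREY=", "BG =", "BG=",
   "LIGHT_BLUE =", "GREEN =", "PURPLE =",
   "CYAN =", "CYAN="]

-- one iteration of A's for-loop; state = (kept, in_rcparams)
def aStep (st : List String × Bool) (line : String) : List String × Bool :=
  let stripped := PySem.Str.strip line
  if PySem.Str.isIn "plt.rcParams.update" line then (st.1, true)
  else if st.2 then (if stripped == "})" then (st.1, false) else (st.1, true))
  else if styleKeywords.any (fun k => PySem.Str.isIn k line) then st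
  else (st.1 ++ [line], st.2)

def strip_style_lines (src : String) : String :=
  let lines := (PySem.Str.split? src "\n").getD []   -- sep "\n" ≠ "": split? is some here
  PySem.Str.join "\n" (lines.foldl aStep ([], false)).1

-- ===== PORT B =====
-- B's inner for-j loop: `rest` with everything up to and including the first "})" line removed
def dropThroughClose : List String → List String
  | [] => []
  | l :: rest => if PySem.Str.strip l == "})" then rest else dropThroughClose rest

-- B's `_cut_first_block`: the for-i loop; `(· :: ·)` rebuilds the `lines[:i]` prefix
def cutFirstBlock : List String → Option (List String)
  | [] => none
  | l :: rest =>
    if PySem.Str.isIn "plt.rcParams.update" l then some (dropThroughClose rest)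
    else (cutFirstBlock rest).map (l :: ·)

theorem dropThroughClose_length_le (ls : List String) :
    (dropThroughClose ls).length ≤ ls.length := by
  induction ls with
  | nil => simp [dropThroughClose]
  | cons l rest ih =>
      simp only [dropThroughClose]
      split
      · simp
      · exact Nat.le_succ_of_le ih

theorem cutFirstBlock_length_lt (ls c : List String) (h : cutFirstBlock ls = some c) :
    c.length < ls.length := by
  induction ls generalizing c with
  | nil => simp [cutFirstBlock] at h
  | cons l rest ih =>
      simp only [cutFirstBlock] at h
      split at h
      · cases h
        exact Nat.lt_succ_of_le (dropThroughClose_length_le rest)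
      · cases hc : cutFirstBlock rest with
        | none => rw [hc] at h; simp at h
        | some c' =>
            rw [hc] at h
            simp only [Option.map_some, Option.some.injEq] at h
            subst h
            simpa using Nat.succ_lt_succ (ih c' hc)

-- B's `while True` loop
def cutAllBlocks (lines : List String) : List String :=
  match h : cutFirstBlock lines with
  | none => lines
  | some c => cutAllBlocks c
termination_by lines.length
decreasing_by exact cutFirstBlock_length_lt _ _ h

def strip_style_lines_alt (src : String) : String :=
  let lines := (PySem.Str.split? src "\n").getD []   -- sep "\n" ≠ "": split? is some here
  PySem.Str.join "\n"
    ((cutAllBlocks lines).filter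
      (fun l => !(styleKeywords.any (fun k => PySem.Str.isIn k l))))

-- ===== PRECONDITION & SPEC =====
def Spec_strip_style_lines (src : String) (out : String) : Prop := out = strip_style_lines_alt src
instance (src : String) (out : String) : Decidable (Spec_strip_style_lines src out) := by unfold Spec_strip_style_lines; infer_instance

-- ===== CLAIM (what is proved, stated in full; the proofs are below) =====
def Claim_equal_strip_style_lines : Prop := ∀ (src : String), Dom_strip_style_lines src → Spec_strip_style_lines src (strip_style_lines src)

-- ===== LEMMAS AND PROOFS =====

-- proof-side fused traversal, the bridge between A's fold and B's staged passes
def bGo : List String → List String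
  | [] => []
  | line :: rest =>
    if PySem.Str.isIn "plt.rcParams.update" line then bGo (dropThroughClose rest)
    else if styleKeywords.any (fun k => PySem.Str.isIn k line) then bGo rest
    else line :: bGo rest
termination_by ls => ls.length
decreasing_by
  · exact Nat.lt_succ_of_le (dropThroughClose_length_le rest)
  · simp
  · simp

-- l decomposes as whitespace ++ strip l ++ whitespace
theorem strip_decomp (l : List Char) :
    ∃ a b, l = a ++ PySem.Chars.strip l ++ b ∧
      (∀ c ∈ a, PySem.Chars.isspace c = true) ∧ (∀ c ∈ b, PySem.Chars.isspace c = true) := by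
  refine ⟨List.takeWhile PySem.Chars.isspace l,
    (List.takeWhile PySem.Chars.isspace (List.dropWhile PySem.Chars.isspace l).reverse).reverse,
    ?_, fun c hc => List.mem_takeWhile_imp hc,
    fun c hc => List.mem_takeWhile_imp (List.mem_reverse.mp hc)⟩
  have h2 : PySem.Chars.strip l ++
      (List.takeWhile PySem.Chars.isspace (List.dropWhile PySem.Chars.isspace l).reverse).reverse =
      List.dropWhile PySem.Chars.isspace l := by
    simp only [PySem.Chars.strip, PySem.Chars.lstrip, PySem.Chars.rstrip]
    rw [← List.reverse_append, List.takeWhile_append_dropWhile, List.reverse_reverse]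
  rw [List.append_assoc, h2, List.takeWhile_append_dropWhile]

-- a line that strips to "})" cannot contain "plt.rcParams.update"
theorem not_update_of_strip (l : String) (h : PySem.Str.strip l = "})") :
    PySem.Str.isIn "plt.rcParams.update" l = false := by
  cases hi : PySem.Str.isIn "plt.rcParams.update" l
  · rfl
  · exfalso
    have hinf := (PySem.Str.isIn_iff_infix _ _).mp hi
    have hP : 'P' ∈ l.toList := hinf.subset (by decide)
    have hs : PySem.Chars.strip l.toList = "})".toList := by
      rw [← PySem.Str.toList_strip, h]
    obtain ⟨a, b, hdec, ha, hb⟩ := strip_decomp l.toList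
    rw [hdec, hs] at hP
    simp only [List.mem_append] at hP
    rcases hP with (hP | hP) | hP
    · have := ha _ hP; revert this; decide
    · revert hP; decide
    · have := hb _ hP; revert this; decide

-- the flag-carrying fold of A computes the fused traversal bGo
theorem fold_eq_bGo (lines : List String) :
    ∀ (acc : List String) (flag : Bool),
      (lines.foldl aStep (acc, flag)).1 =
        acc ++ bGo (if flag then dropThroughClose lines else lines) := by
  induction lines with
  | nil => intro acc flag; cases flag <;> simp [dropThroughClose, bGo]
  | cons l rest ih =>
      intro acc flag
      simp only [List.foldl_cons]
      cases flag
      · cases hu : PySem.Str.isIn "plt.rcParams.update" l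
        · cases hk : styleKeywords.any (fun k => PySem.Str.isIn k l)
          · show (List.foldl aStep (aStep (acc, false) l) rest).1 = _
            simp only [aStep, hu, hk]
            simp only [Bool.false_eq_true, if_false]
            rw [ih (acc ++ [l]) false]
            simp only [bGo, hu, hk, Bool.false_eq_true, if_false, List.append_assoc,
              List.singleton_append]
          · show (List.foldl aStep (aStep (acc, false) l) rest).1 = _
            simp only [aStep, hu, hk]
            simp only [Bool.false_eq_true, if_false, if_true]
            rw [ih acc false]
            simp only [bGo, hu, hk, Bool.false_eq_true, if_false, if_true]
        · show (List.foldl aStep (aStep (acc, false) l) rest).1 = _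
          simp only [aStep, hu, if_true]
          rw [ih acc true]
          simp only [bGo, hu, Bool.false_eq_true, if_false, if_true]
      · cases hu : PySem.Str.isIn "plt.rcParams.update" l
        · cases hs : PySem.Str.strip l == "})"
          · show (List.foldl aStep (aStep (acc, true) l) rest).1 = _
            simp only [aStep, hu, hs]
            simp only [Bool.false_eq_true, if_false, if_true]
            rw [ih acc true]
            simp only [dropThroughClose, hs, Bool.false_eq_true, if_false, if_true]
          · show (List.foldl aStep (aStep (acc, true) l) rest).1 = _
            simp only [aStep, hu, hs]
            simp only [Bool.false_eq_true, if_false, if_true]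
            rw [ih acc false]
            simp only [dropThroughClose, hs, Bool.false_eq_true, if_false, if_true]
        · -- a line containing the update marker can never be the closing "})"
          have hs : (PySem.Str.strip l == "})") = false := by
            cases he : PySem.Str.strip l == "})"
            · rfl
            · have hse : PySem.Str.strip l = "})" := by simpa using he
              have hfalse := not_update_of_strip l hse
              rw [hu] at hfalse
              exact absurd hfalse (by simp)
          show (List.foldl aStep (aStep (acc, true) l) rest).1 = _
          simp only [aStep, hu, if_true]
          rw [ih acc true]
          simp only [dropThroughClose, hs, Bool.false_eq_true, if_false, if_true]

-- unfolding equation for the well-founded cutAllBlocks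
theorem cutAllBlocks_eq (ls : List String) :
    cutAllBlocks ls = match cutFirstBlock ls with
      | none => ls
      | some c => cutAllBlocks c := by
  rw [cutAllBlocks]
  split <;> rename_i h <;> simp [h]

-- cutAllBlocks commutes with consing a marker-free line
theorem cutAll_cons (l : String) (rest : List String)
    (hu : PySem.Str.isIn "plt.rcParams.update" l = false) :
    cutAllBlocks (l :: rest) = l :: cutAllBlocks rest := by
  induction hlen : rest.length using Nat.strong_induction_on generalizing rest with
  | _ n ih =>
      subst hlen
      rw [cutAllBlocks_eq (l :: rest)]
      simp only [cutFirstBlock, hu, Bool.false_eq_true, if_false]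
      cases hc : cutFirstBlock rest with
      | none =>
          simp only [Option.map_none]
          rw [cutAllBlocks_eq rest, hc]
      | some c =>
          simp only [Option.map_some]
          have hlt := cutFirstBlock_length_lt rest c hc
          rw [ih c.length hlt c rfl]
          rw [cutAllBlocks_eq rest, hc]

-- the fused traversal equals B's staged passes: excise all blocks, then filter keywords
theorem bGo_eq_staged (ls : List String) :
    bGo ls = (cutAllBlocks ls).filter
      (fun l => !(styleKeywords.any (fun k => PySem.Str.isIn k l))) := by
  induction hlen : ls.length using Nat.strong_induction_on generalizing ls with
  | _ n ih =>
      subst hlen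
      cases ls with
      | nil => simp [bGo, cutAllBlocks_eq, cutFirstBlock]
      | cons l rest =>
          cases hu : PySem.Str.isIn "plt.rcParams.update" l
          · rw [cutAll_cons l rest hu, List.filter_cons]
            simp only [bGo, hu, Bool.false_eq_true, if_false]
            rw [ih rest.length (by simp) rest rfl]
            cases hk : styleKeywords.any (fun k => PySem.Str.isIn k l) <;> simp [hk]
          · have h1 : cutAllBlocks (l :: rest) = cutAllBlocks (dropThroughClose rest) := by
              have hc : cutFirstBlock (l :: rest) = some (dropThroughClose rest) := by
                unfold cutFirstBlock; rw [hu]; simp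
              rw [cutAllBlocks_eq, hc]
            simp only [bGo, hu, if_true, h1]
            exact ih (dropThroughClose rest).length
              (Nat.lt_succ_of_le (dropThroughClose_length_le rest)) _ rfl

-- ===== VERDICT (by name: the statement is the Claim_ definition above) =====
theorem strip_style_lines_spec : Claim_equal_strip_style_lines := by
  intro src _
  unfold Spec_strip_style_lines strip_style_lines strip_style_lines_alt
  show PySem.Str.join "\n" (((PySem.Str.split? src "\n").getD []).foldl aStep ([], false)).1 = _
  rw [fold_eq_bGo]
  simp [bGo_eq_staged]
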